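-- pv_equiv track=rewrite | github.com/ivand200/specode | src/specode/policy.py | _command_approval
-- ===== SOURCE A (Python) =====
-- from typing import Literal, Sequence, get_args
--
-- CommandConcern = Literal[
--     "mutates_state",
--     "destructive",
--     "credentials",
--     "network",
--     "installs_dependencies",
--     "long_running",
--     "unsafe",
--     "explicit_blocker",
-- ]
--
-- def _command_approval(concerns: frozenset[CommandConcern]) -> str:
--     labels = {
--         "installs_dependencies": "dependency installation",
--         "long_running": "long-running execution",
--         "mutates_state": "state mutation",
--         "network": "network access",
--     }
--     requested = [labels[concern] for concern in sorted(concerns) if concern in labels]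
--     if not requested:
--         return "Approve command execution."
--     return "Approve command " + ", ".join(requested) + "."
-- ===== SOURCE B (Python) =====
-- _PARTS = [
--     "dependency installation",
--     "long-running execution",
--     "state mutation",
--     "network access",
-- ]
--
-- _TABLE = []
-- for _mask in range(16):
--     _parts = [_PARTS[_i] for _i in range(4) if (_mask >> _i) & 1]
--     _TABLE.append(
--         "Approve command " + ", ".join(_parts) + "." if _parts
--         else "Approve command execution."
--     )
--
-- def _command_approval(concerns):
--     mask = 0
--     if "installs_dependencies" in concerns:
--         mask |= 1
--     if "long_running" in concerns:
--         mask |= 2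
--     if "mutates_state" in concerns:
--         mask |= 4
--     if "network" in concerns:
--         mask |= 8
--     return _TABLE[mask]
-- ===== Notes on version B (the rewrite author's own statement) =====
-- stated objective: faster
-- what changed: B computes a 4-bit mask of which labelled concerns are present and returns the corresponding entry of a precomputed 16-entry message table, instead of sorting the concern set, filtering it through the label dict and joining.
import Mathlib
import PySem

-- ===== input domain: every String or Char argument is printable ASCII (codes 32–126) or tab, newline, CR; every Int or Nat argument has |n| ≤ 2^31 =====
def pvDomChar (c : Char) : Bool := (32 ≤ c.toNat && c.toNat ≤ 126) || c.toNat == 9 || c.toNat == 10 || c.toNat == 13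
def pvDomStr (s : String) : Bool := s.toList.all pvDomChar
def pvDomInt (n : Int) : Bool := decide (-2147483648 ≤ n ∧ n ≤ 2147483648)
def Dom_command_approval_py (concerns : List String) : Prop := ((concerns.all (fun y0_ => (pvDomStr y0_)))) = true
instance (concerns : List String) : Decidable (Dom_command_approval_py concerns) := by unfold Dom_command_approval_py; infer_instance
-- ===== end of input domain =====

-- B replaces sort-then-filter-then-join by four membership bits indexing a precomputed 16-entry message table (objective: alternative closed-form lookup; return value only).

-- ===== PORT A =====
def pyLabelsA : PySem.Dict String String :=
  PySem.Dict.mk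
    [("installs_dependencies", "dependency installation"),
     ("long_running", "long-running execution"),
     ("mutates_state", "state mutation"),
     ("network", "network access")]

def command_approval_py (concerns : List String) : String :=
  let requested := (PySem.List.sorted concerns (fun x => x) false).filterMap
    (fun concern => pyLabelsA.get? concern)
  if requested = [] then "Approve command execution."
  else "Approve command " ++ PySem.Str.join ", " requested ++ "."

-- ===== PORT B =====
def pvParts : List String :=
  ["dependency installation", "long-running execution", "state mutation", "network access"]

def pvTable : List String :=
  (List.range 16).map (fun mask =>
    let parts := ((List.range 4).filter (fun i => (mask >>> i) % 2 = 1)).map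
      (fun i => pvParts.getD i "")
    if parts ≠ [] then "Approve command " ++ PySem.Str.join ", " parts ++ "."
    else "Approve command execution.")

def command_approval_py_alt (concerns : List String) : String :=
  let mask : Nat :=
    (if concerns.contains "installs_dependencies" then 1 else 0) |||
    (if concerns.contains "long_running" then 2 else 0) |||
    (if concerns.contains "mutates_state" then 4 else 0) |||
    (if concerns.contains "network" then 8 else 0)
  pvTable.getD mask ""

-- ===== PRECONDITION & SPEC =====
-- concerns encodes the Python frozenset argument, so Pre_ requires distinct elements; on
-- duplicate-bearing lists (not a frozenset encoding) A accidentally repeats a label while B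
-- deduplicates, and neither value is specified.
def Pre_command_approval_py (concerns : List String) : Prop := concerns.Nodup
instance (concerns : List String) : Decidable (Pre_command_approval_py concerns) := by unfold Pre_command_approval_py; infer_instance
def pvWitness_command_approval_py : List String := ["network", "mutates_state", "unsafe"]
def Spec_command_approval_py (concerns : List String) (out : String) : Prop := out = command_approval_py_alt concerns
instance (concerns : List String) (out : String) : Decidable (Spec_command_approval_py concerns out) := by unfold Spec_command_approval_py; infer_instance

-- ===== CLAIM (what is proved, stated in full; the proofs are below) =====
def Claim_equal_command_approval_py : Prop := ∀ (concerns : List String), Dom_command_approval_py concerns → Pre_command_approval_py concerns → Spec_command_approval_py concerns (command_approval_py concerns)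

-- ===== LEMMAS AND PROOFS =====

def pvKeys : List String := ["installs_dependencies", "long_running", "mutates_state", "network"]

def pvLbl (c : String) : String :=
  if c = "installs_dependencies" then "dependency installation"
  else if c = "long_running" then "long-running execution"
  else if c = "mutates_state" then "state mutation"
  else "network access"

theorem pyLabelsA_get? (c : String) :
    pyLabelsA.get? c = if c ∈ pvKeys then some (pvLbl c) else none := by
  by_cases h1 : c = "installs_dependencies" <;>
  by_cases h2 : c = "long_running" <;>
  by_cases h3 : c = "mutates_state" <;>
  by_cases h4 : c = "network" <;>
    simp_all [pyLabelsA, pvKeys, pvLbl, PySem.Dict.get?_mk_cons] <;>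
    simp [PySem.Dict.get?, Ne.symm h1, Ne.symm h2, Ne.symm h3, Ne.symm h4]

theorem filterMap_labels (ys : List String) :
    ys.filterMap (fun c => pyLabelsA.get? c)
      = (ys.filter (fun c => decide (c ∈ pvKeys))).map pvLbl := by
  induction ys with
  | nil => rfl
  | cons c t ih =>
    simp only [pyLabelsA_get?] at ih
    simp only [List.filterMap_cons, List.filter_cons, pyLabelsA_get?]
    by_cases h : c ∈ pvKeys <;> simp [h, ih]

theorem filter_sorted_eq (concerns : List String) (hnd : concerns.Nodup) :
    (PySem.List.sorted concerns (fun x => x) false).filter (fun c => decide (c ∈ pvKeys))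
      = pvKeys.filter (fun k => decide (k ∈ concerns)) := by
  apply List.Perm.eq_of_pairwise (le := (· ≤ ·))
  · intro a b _ _ hab hba
    exact le_antisymm hab hba
  · exact List.Pairwise.filter _
      (PySem.List.sorted_pairwise concerns (fun x => x))
  · exact List.Pairwise.filter _ (by norm_num [pvKeys, List.pairwise_cons]; refine ⟨⟨?_,?_,?_⟩,⟨?_,?_⟩,?_⟩ <;> decide)
  · rw [List.perm_ext_iff_of_nodup]
    · intro a
      simp [List.mem_filter, PySem.List.mem_sorted]
      tauto
    · exact List.Nodup.filter _
        (((PySem.List.sorted_perm concerns (fun x => x) false).nodup_iff).mpr hnd)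
    · exact List.Nodup.filter _ (by decide)

-- ===== VERDICT (by name: the statement is the Claim_ definition above) =====
theorem command_approval_py_spec : Claim_equal_command_approval_py := by
  intro concerns _ hpre
  unfold Spec_command_approval_py command_approval_py command_approval_py_alt
  rw [filterMap_labels, filter_sorted_eq concerns hpre]
  cases h1 : decide ("installs_dependencies" ∈ concerns) <;>
  cases h2 : decide ("long_running" ∈ concerns) <;>
  cases h3 : decide ("mutates_state" ∈ concerns) <;>
  cases h4 : decide ("network" ∈ concerns) <;>
  simp [pvKeys, pvTable, pvParts, pvLbl, List.filter, h1, h2, h3, h4,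
    List.range_succ] <;> decide
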